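-- pv_equiv track=rewrite | github.com/bob686868/Leetcode-100-day-challenge- | day60.py | lc3531
-- ===== SOURCE A (Python) =====
-- def lc3531(n,buildings):
--     maxX,minX={},{} ## min x for a specific value of y
--     maxY,minY={},{}
--
--     for b in buildings:
--         bx,by=b
--         if by not in minX:
--             minX[by]=bx
--             maxX[by]=bx
--         if bx not in minY:
--             minY[bx]=by
--             maxY[bx]=by
--         minX[by]=min(bx,minX[by])
--         maxX[by]=max(bx,maxX[by])
--         minY[bx]=min(by,minY[bx])
--         maxY[bx]=max(by,maxY[bx])
--     res=0
--     for b in buildings: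
--         bx,by=b
--         if bx>minX[by] and bx<maxX[by] and by>minY[bx] and by<maxY[bx]:
--             res+=1
--     return res
-- ===== SOURCE B (Python) =====
-- def lc3531(n, buildings):
--     res = 0
--     for bx, by in buildings:
--         if (any(x < bx for x, y in buildings if y == by)
--                 and any(x > bx for x, y in buildings if y == by)
--                 and any(y < by for x, y in buildings if x == bx)
--                 and any(y > by for x, y in buildings if x == bx)):
--             res += 1
--     return res
-- ===== Notes on version B (the rewrite author's own statement) =====
-- stated objective: simpler
-- what changed: B drops all four extreme tables and the table-building pass: for each building it directly tests, by scanning the list, whether some building lies strictly left and strictly right in its row and strictly below and strictly above in its column (quadratic existence checks instead of precomputed per-row/per-column min/max dicts).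
import Mathlib
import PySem

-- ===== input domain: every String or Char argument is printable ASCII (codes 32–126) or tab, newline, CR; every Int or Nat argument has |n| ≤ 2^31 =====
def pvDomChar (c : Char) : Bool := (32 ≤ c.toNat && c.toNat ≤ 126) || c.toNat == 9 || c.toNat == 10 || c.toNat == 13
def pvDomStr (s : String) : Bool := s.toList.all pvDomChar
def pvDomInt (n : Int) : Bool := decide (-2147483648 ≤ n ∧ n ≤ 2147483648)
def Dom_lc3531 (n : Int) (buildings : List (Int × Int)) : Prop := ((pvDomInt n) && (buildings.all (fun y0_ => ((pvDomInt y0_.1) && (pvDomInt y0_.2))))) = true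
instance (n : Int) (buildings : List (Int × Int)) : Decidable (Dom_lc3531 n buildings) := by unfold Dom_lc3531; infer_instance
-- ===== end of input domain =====

-- B drops A's four extreme tables entirely: for each building it directly scans the list
-- for a building strictly left/right in its row and strictly below/above in its column
-- (quadratic existence checks instead of precomputed min/max dicts); simpler, not faster.

-- ===== PORT A =====
-- one loop iteration of A: conditional seeding of the four dicts, then the min/max updates
def lc3531Step
    (st : PySem.Dict Int Int × PySem.Dict Int Int × PySem.Dict Int Int × PySem.Dict Int Int)
    (b : Int × Int) :
    PySem.Dict Int Int × PySem.Dict Int Int × PySem.Dict Int Int × PySem.Dict Int Int :=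
  let maxX := st.1
  let minX := st.2.1
  let maxY := st.2.2.1
  let minY := st.2.2.2
  -- if by not in minX: minX[by]=bx; maxX[by]=bx
  let minX' := if minX.contains b.2 then minX else minX.insert b.2 b.1
  let maxX' := if minX.contains b.2 then maxX else maxX.insert b.2 b.1
  -- if bx not in minY: minY[bx]=by; maxY[bx]=by
  let minY' := if minY.contains b.1 then minY else minY.insert b.1 b.2
  let maxY' := if minY.contains b.1 then maxY else maxY.insert b.1 b.2
  -- the four unconditional updates (the key is present here, so getD's default is never used)
  let minX'' := minX'.insert b.2 (min b.1 (minX'.getD b.2 0))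
  let maxX'' := maxX'.insert b.2 (max b.1 (maxX'.getD b.2 0))
  let minY'' := minY'.insert b.1 (min b.2 (minY'.getD b.1 0))
  let maxY'' := maxY'.insert b.1 (max b.2 (maxY'.getD b.1 0))
  (maxX'', minX'', maxY'', minY'')

def lc3531 (n : Int) (buildings : List (Int × Int)) : Int :=
  let st := buildings.foldl lc3531Step
    (PySem.Dict.empty, PySem.Dict.empty, PySem.Dict.empty, PySem.Dict.empty)
  buildings.foldl (fun res b =>
    if b.1 > st.2.1.getD b.2 0 ∧ b.1 < st.1.getD b.2 0 ∧
       b.2 > st.2.2.2.getD b.1 0 ∧ b.2 < st.2.2.1.getD b.1 0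
    then res + 1 else res) 0

-- ===== PORT B =====
def lc3531_alt (n : Int) (buildings : List (Int × Int)) : Int :=
  buildings.foldl (fun res b =>
    if (buildings.any (fun p => p.2 == b.2 && p.1 < b.1)) &&
       (buildings.any (fun p => p.2 == b.2 && p.1 > b.1)) &&
       (buildings.any (fun p => p.1 == b.1 && p.2 < b.2)) &&
       (buildings.any (fun p => p.1 == b.1 && p.2 > b.2))
    then res + 1 else res) 0

-- ===== PRECONDITION & SPEC =====
def Spec_lc3531 (n : Int) (buildings : List (Int × Int)) (out : Int) : Prop := out = lc3531_alt n buildings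
instance (n : Int) (buildings : List (Int × Int)) (out : Int) : Decidable (Spec_lc3531 n buildings out) := by unfold Spec_lc3531; infer_instance

-- ===== CLAIM (what is proved, stated in full; the proofs are below) =====
def Claim_equal_lc3531 : Prop := ∀ (n : Int) (buildings : List (Int × Int)), Dom_lc3531 n buildings → Spec_lc3531 n buildings (lc3531 n buildings)

-- ===== LEMMAS AND PROOFS =====

-- the x-coordinates of the buildings in row k, in list order
def rowXs (l : List (Int × Int)) (k : Int) : List Int :=
  (l.filter (fun b => b.2 == k)).map (fun b => b.1)

-- the y-coordinates of the buildings in column k, in list order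
def colYs (l : List (Int × Int)) (k : Int) : List Int :=
  (l.filter (fun b => b.1 == k)).map (fun b => b.2)

-- running minimum / maximum of a list, none on []
def omin (l : List Int) : Option Int := match l with | [] => none | x :: t => some (t.foldl min x)
def omax (l : List Int) : Option Int := match l with | [] => none | x :: t => some (t.foldl max x)

theorem contains_eq_isSome {κ ν : Type} [BEq κ] (d : PySem.Dict κ ν) (k : κ) :
    d.contains k = (d.get? k).isSome := by
  simp only [PySem.Dict.contains, PySem.Dict.get?]
  rw [Bool.eq_iff_iff]
  simp [List.any_eq_true, List.find?_isSome]

theorem rowXs_append_single (l : List (Int × Int)) (b : Int × Int) (k : Int) :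
    rowXs (l ++ [b]) k = rowXs l k ++ (if b.2 = k then [b.1] else []) := by
  by_cases h : b.2 = k <;> simp [rowXs, List.filter_append, h]

theorem rowXs_swap (l : List (Int × Int)) (k : Int) :
    rowXs (l.map Prod.swap) k = colYs l k := by
  simp [rowXs, colYs, List.filter_map, List.map_map, Function.comp_def]

-- the (maxX, minX) pair evolves independently of the (maxY, minY) pair; this is its step
def pairStep (p : PySem.Dict Int Int × PySem.Dict Int Int) (b : Int × Int) :
    PySem.Dict Int Int × PySem.Dict Int Int :=
  let minX' := if p.2.contains b.2 then p.2 else p.2.insert b.2 b.1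
  let maxX' := if p.2.contains b.2 then p.1 else p.1.insert b.2 b.1
  (maxX'.insert b.2 (max b.1 (maxX'.getD b.2 0)), minX'.insert b.2 (min b.1 (minX'.getD b.2 0)))

theorem step_decomp (st : PySem.Dict Int Int × PySem.Dict Int Int × PySem.Dict Int Int × PySem.Dict Int Int)
    (b : Int × Int) :
    lc3531Step st b =
      ((pairStep (st.1, st.2.1) b).1, (pairStep (st.1, st.2.1) b).2,
       (pairStep (st.2.2.1, st.2.2.2) (b.2, b.1)).1, (pairStep (st.2.2.1, st.2.2.2) (b.2, b.1)).2) := by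
  rfl

theorem fold_decomp (l : List (Int × Int)) :
    ∀ (a b c d : PySem.Dict Int Int),
      l.foldl lc3531Step (a, b, c, d) =
        ((l.foldl pairStep (a, b)).1, (l.foldl pairStep (a, b)).2,
         ((l.map Prod.swap).foldl pairStep (c, d)).1, ((l.map Prod.swap).foldl pairStep (c, d)).2) := by
  induction l with
  | nil => intro a b c d; rfl
  | cons e t ih =>
      intro a b c d
      simp only [List.foldl_cons, List.map_cons, step_decomp]
      exact ih _ _ _ _

-- invariant of the pair-fold: max/min dict lookups are the running extremes of the rows seen
def InvP (pre : List (Int × Int)) (p : PySem.Dict Int Int × PySem.Dict Int Int) : Prop :=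
  ∀ k, p.1.get? k = omax (rowXs pre k) ∧ p.2.get? k = omin (rowXs pre k)

theorem pairStep_inv (pre : List (Int × Int)) (b : Int × Int)
    (p : PySem.Dict Int Int × PySem.Dict Int Int) (h : InvP pre p) :
    InvP (pre ++ [b]) (pairStep p b) := by
  obtain ⟨mx, mn⟩ := p
  have hcont : mn.contains b.2 = (omin (rowXs pre b.2)).isSome := by
    rw [contains_eq_isSome, (h b.2).2]
  intro k
  rcases hr : rowXs pre b.2 with _ | ⟨x, t⟩
  · -- row b.2 empty so far: both dicts get seeded with b.1, then min/max b.1 b.1 = b.1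
    have hc : mn.contains b.2 = false := by rw [hcont, hr]; rfl
    by_cases hk : k = b.2
    · subst hk
      simp [pairStep, hc, rowXs_append_single, hr, omin, omax]
    · have := h k
      have hne : ¬ b.2 = k := fun h' => hk h'.symm
      rw [rowXs_append_single, if_neg hne, List.append_nil]
      simp only [pairStep, hc, if_false, Bool.false_eq_true]
      simp [PySem.Dict.get?_insert, hk, this.1, this.2]
  · -- row b.2 already seen: one insert each with min/max of new and old extreme
    have hc : mn.contains b.2 = true := by rw [hcont, hr]; rfl
    have hmn : mn.getD b.2 0 = t.foldl min x := by
      rw [PySem.Dict.getD_eq_get?_getD, (h b.2).2, hr]; rfl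
    have hmx : mx.getD b.2 0 = t.foldl max x := by
      rw [PySem.Dict.getD_eq_get?_getD, (h b.2).1, hr]; rfl
    by_cases hk : k = b.2
    · subst hk
      simp [pairStep, hc, hmn, hmx,
        rowXs_append_single, hr, omin, omax, List.foldl_append,
        min_comm, max_comm]
    · have := h k
      have hne : ¬ b.2 = k := fun h' => hk h'.symm
      rw [rowXs_append_single, if_neg hne, List.append_nil]
      simp only [pairStep, hc, if_true]
      simp [PySem.Dict.get?_insert, hk, this.1, this.2]

theorem pairFold_inv (l : List (Int × Int)) :
    ∀ (pre : List (Int × Int)) (p : PySem.Dict Int Int × PySem.Dict Int Int),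
      InvP pre p → InvP (pre ++ l) (l.foldl pairStep p) := by
  induction l with
  | nil => intro pre p h; simpa using h
  | cons b t ih =>
      intro pre p h
      have := ih (pre ++ [b]) (pairStep p b) (pairStep_inv pre b p h)
      simpa [List.append_assoc] using this

theorem pairFold_inv_nil (l : List (Int × Int)) :
    InvP l (l.foldl pairStep (PySem.Dict.empty, PySem.Dict.empty)) := by
  have h0 : InvP [] (PySem.Dict.empty, PySem.Dict.empty) := by
    intro k; simp [PySem.Dict.get?_empty, rowXs, omin, omax]
  simpa using pairFold_inv l [] _ h0

-- a running minimum is below c iff some list element is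
theorem foldl_min_lt (t : List Int) (x c : Int) :
    t.foldl min x < c ↔ x < c ∨ ∃ a ∈ t, a < c := by
  induction t generalizing x with
  | nil => simp
  | cons a s ih =>
      rw [List.foldl_cons, ih]
      constructor
      · rintro (h | h)
        · rcases lt_or_ge x a with hxa | hxa
          · left; omega
          · right; exact ⟨a, List.mem_cons_self, by omega⟩
        · right; obtain ⟨e, he, hec⟩ := h; exact ⟨e, List.mem_cons_of_mem a he, hec⟩
      · rintro (h | ⟨e, he, hec⟩)
        · left; omega
        · rcases List.mem_cons.1 he with rfl | he'
          · left; omega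
          · right; exact ⟨e, he', hec⟩

-- a running maximum is above c iff some list element is
theorem foldl_max_gt (t : List Int) (x c : Int) :
    c < t.foldl max x ↔ c < x ∨ ∃ a ∈ t, c < a := by
  induction t generalizing x with
  | nil => simp
  | cons a s ih =>
      rw [List.foldl_cons, ih]
      constructor
      · rintro (h | h)
        · rcases lt_or_ge a x with hxa | hxa
          · left; omega
          · right; exact ⟨a, List.mem_cons_self, by omega⟩
        · right; obtain ⟨e, he, hec⟩ := h; exact ⟨e, List.mem_cons_of_mem a he, hec⟩
      · rintro (h | ⟨e, he, hec⟩)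
        · left; omega
        · rcases List.mem_cons.1 he with rfl | he'
          · left; omega
          · right; exact ⟨e, he', hec⟩

-- mem of rowXs / colYs restated as the existence B tests
theorem mem_rowXs (l : List (Int × Int)) (k a : Int) :
    a ∈ rowXs l k ↔ ∃ p ∈ l, p.2 = k ∧ p.1 = a := by
  simp only [rowXs, List.mem_map, List.mem_filter, beq_iff_eq]
  constructor
  · rintro ⟨p, ⟨hp, hk⟩, rfl⟩; exact ⟨p, hp, hk, rfl⟩
  · rintro ⟨p, hp, hk, rfl⟩; exact ⟨p, ⟨hp, hk⟩, rfl⟩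

theorem mem_colYs (l : List (Int × Int)) (k a : Int) :
    a ∈ colYs l k ↔ ∃ p ∈ l, p.1 = k ∧ p.2 = a := by
  simp only [colYs, List.mem_map, List.mem_filter, beq_iff_eq]
  constructor
  · rintro ⟨p, ⟨hp, hk⟩, rfl⟩; exact ⟨p, hp, hk, rfl⟩
  · rintro ⟨p, hp, hk, rfl⟩; exact ⟨p, ⟨hp, hk⟩, rfl⟩

-- ===== VERDICT (by name: the statement is the Claim_ definition above) =====
theorem lc3531_spec : Claim_equal_lc3531 := by
  intro n bs _
  unfold Spec_lc3531
  have hX := pairFold_inv_nil bs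
  have hY := pairFold_inv_nil (bs.map Prod.swap)
  simp only [lc3531, lc3531_alt, fold_decomp]
  apply PySem.List.foldl_congr_mem
  intro acc b hb
  -- the row of b and the column of b are nonempty: b itself lies in both
  have hbr : b.1 ∈ rowXs bs b.2 := (mem_rowXs bs b.2 b.1).2 ⟨b, hb, rfl, rfl⟩
  have hbc : b.2 ∈ colYs bs b.1 := (mem_colYs bs b.1 b.2).2 ⟨b, hb, rfl, rfl⟩
  rcases hr : rowXs bs b.2 with _ | ⟨x, t⟩
  · rw [hr] at hbr; cases hbr
  rcases hc : colYs bs b.1 with _ | ⟨y, s⟩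
  · rw [hc] at hbc; cases hbc
  -- A's four lookups are the row/column extremes
  have aMinX : ((bs.foldl pairStep (PySem.Dict.empty, PySem.Dict.empty)).2).getD b.2 0 = t.foldl min x := by
    rw [PySem.Dict.getD_eq_get?_getD, (hX b.2).2, hr]; rfl
  have aMaxX : ((bs.foldl pairStep (PySem.Dict.empty, PySem.Dict.empty)).1).getD b.2 0 = t.foldl max x := by
    rw [PySem.Dict.getD_eq_get?_getD, (hX b.2).1, hr]; rfl
  have aMinY : (((bs.map Prod.swap).foldl pairStep (PySem.Dict.empty, PySem.Dict.empty)).2).getD b.1 0 = s.foldl min y := by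
    rw [PySem.Dict.getD_eq_get?_getD, (hY b.1).2, rowXs_swap, hc]; rfl
  have aMaxY : (((bs.map Prod.swap).foldl pairStep (PySem.Dict.empty, PySem.Dict.empty)).1).getD b.1 0 = s.foldl max y := by
    rw [PySem.Dict.getD_eq_get?_getD, (hY b.1).1, rowXs_swap, hc]; rfl
  rw [aMinX, aMaxX, aMinY, aMaxY]
  -- extreme-comparisons ↔ B's existence scans
  have e1 : (t.foldl min x < b.1) ↔ (bs.any (fun p => p.2 == b.2 && p.1 < b.1) = true) := by
    have : t.foldl min x < b.1 ↔ ∃ a ∈ x :: t, a < b.1 := by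
      rw [foldl_min_lt]; simp
    rw [this, ← hr]
    simp only [List.any_eq_true, Bool.and_eq_true, beq_iff_eq, decide_eq_true_eq]
    constructor
    · rintro ⟨a, ha, hlt⟩
      obtain ⟨p, hp, hk, rfl⟩ := (mem_rowXs bs b.2 a).1 ha
      exact ⟨p, hp, hk, hlt⟩
    · rintro ⟨p, hp, hk, hlt⟩
      exact ⟨p.1, (mem_rowXs bs b.2 p.1).2 ⟨p, hp, hk, rfl⟩, hlt⟩
  have e2 : (b.1 < t.foldl max x) ↔ (bs.any (fun p => p.2 == b.2 && p.1 > b.1) = true) := by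
    have : b.1 < t.foldl max x ↔ ∃ a ∈ x :: t, b.1 < a := by
      rw [foldl_max_gt]; simp
    rw [this, ← hr]
    simp only [List.any_eq_true, Bool.and_eq_true, beq_iff_eq, gt_iff_lt, decide_eq_true_eq]
    constructor
    · rintro ⟨a, ha, hlt⟩
      obtain ⟨p, hp, hk, rfl⟩ := (mem_rowXs bs b.2 a).1 ha
      exact ⟨p, hp, hk, hlt⟩
    · rintro ⟨p, hp, hk, hlt⟩
      exact ⟨p.1, (mem_rowXs bs b.2 p.1).2 ⟨p, hp, hk, rfl⟩, hlt⟩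
  have e3 : (s.foldl min y < b.2) ↔ (bs.any (fun p => p.1 == b.1 && p.2 < b.2) = true) := by
    have : s.foldl min y < b.2 ↔ ∃ a ∈ y :: s, a < b.2 := by
      rw [foldl_min_lt]; simp
    rw [this, ← hc]
    simp only [List.any_eq_true, Bool.and_eq_true, beq_iff_eq, decide_eq_true_eq]
    constructor
    · rintro ⟨a, ha, hlt⟩
      obtain ⟨p, hp, hk, rfl⟩ := (mem_colYs bs b.1 a).1 ha
      exact ⟨p, hp, hk, hlt⟩
    · rintro ⟨p, hp, hk, hlt⟩
      exact ⟨p.2, (mem_colYs bs b.1 p.2).2 ⟨p, hp, hk, rfl⟩, hlt⟩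
  have e4 : (b.2 < s.foldl max y) ↔ (bs.any (fun p => p.1 == b.1 && p.2 > b.2) = true) := by
    have : b.2 < s.foldl max y ↔ ∃ a ∈ y :: s, b.2 < a := by
      rw [foldl_max_gt]; simp
    rw [this, ← hc]
    simp only [List.any_eq_true, Bool.and_eq_true, beq_iff_eq, gt_iff_lt, decide_eq_true_eq]
    constructor
    · rintro ⟨a, ha, hlt⟩
      obtain ⟨p, hp, hk, rfl⟩ := (mem_colYs bs b.1 a).1 ha
      exact ⟨p, hp, hk, hlt⟩
    · rintro ⟨p, hp, hk, hlt⟩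
      exact ⟨p.2, (mem_colYs bs b.1 p.2).2 ⟨p, hp, hk, rfl⟩, hlt⟩
  simp only [Bool.and_eq_true]
  split_ifs with h1 h2 h2
  · rfl
  · exact absurd ⟨⟨⟨e1.1 h1.1, e2.1 h1.2.1⟩, e3.1 h1.2.2.1⟩, e4.1 h1.2.2.2⟩ h2
  · exact absurd ⟨e1.2 h2.1.1.1, e2.2 h2.1.1.2, e3.2 h2.1.2, e4.2 h2.2⟩ h1
  · rfl
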